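-- pv_equiv track=rewrite | github.com/galonsky/adventofcode | 2016/14/day14.py | find_repetition
-- ===== SOURCE A (Python) =====
-- from typing import Optional, Callable
--
-- def find_repetition(string: str, num: int, ch: str = None) -> Optional[str]:
--     if ch:
--         return ch if ch * num in string else None
--     for i in range(len(string) - num + 1):
--         substr = string[i:i+num]
--         if len(set(substr)) == 1:
--             return substr[0]
--     return None
-- ===== SOURCE B (Python) =====
-- def find_repetition(string, num, ch=None):
--     if ch:
--         return ch if ch * num in string else None
--     run = 0
--     prev = None
--     for c in string:
--         run = run + 1 if c == prev else 1
--         prev = c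
--         if run == num:
--             return c
--     return None
-- ===== Notes on version B (the rewrite author's own statement) =====
-- stated objective: alternative
-- what changed: Replaces A's per-start-index window scan (a fresh slice and a set built for each of the O(n) windows) by a single pass over the string that tracks the length of the current run of consecutive equal characters.
-- intended difference: For num < 0 with ch falsy, A's slice stop i+num wraps around via Python negative indexing, so A returns a character whenever the first len(string)+num-long constant run starts before -num (e.g. find_repetition('ab', -1) == 'a'); B returns None there, the intended answer for a nonsensical repetition count. — e.g. on find_repetition("ab", -1, none): A returns some "a", B returns none
import Mathlib
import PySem

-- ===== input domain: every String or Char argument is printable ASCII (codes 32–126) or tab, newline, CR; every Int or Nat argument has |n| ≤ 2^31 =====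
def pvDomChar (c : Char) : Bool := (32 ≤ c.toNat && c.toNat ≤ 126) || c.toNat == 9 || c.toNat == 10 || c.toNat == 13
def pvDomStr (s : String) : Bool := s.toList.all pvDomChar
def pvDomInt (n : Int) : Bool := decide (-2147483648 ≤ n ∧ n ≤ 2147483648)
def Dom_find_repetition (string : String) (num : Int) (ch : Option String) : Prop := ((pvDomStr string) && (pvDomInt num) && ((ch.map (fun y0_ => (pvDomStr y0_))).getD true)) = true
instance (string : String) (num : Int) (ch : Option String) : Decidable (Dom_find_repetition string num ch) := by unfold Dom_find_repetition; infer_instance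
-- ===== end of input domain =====

-- B replaces A's window scan (a fresh slice and set built per start index) by a single pass
-- tracking the length of the current run of equal characters (objective: alternative).

-- ===== PORT A =====
-- the for-loop with early return, over the index list range(len(string) - num + 1)
def pvALoop (l : List Char) (num : Int) : List Int → Option String
  | [] => none
  | i :: rest =>
    let substr := PySem.List.slice l (some i) (some (i + num))
    if (PySem.Set.ofList substr).length = 1 then
      (PySem.List.pyGet? substr 0).map (fun c => String.ofList [c])
    else pvALoop l num rest

def find_repetition (string : String) (num : Int) (ch : Option String) : Option String :=
  match ch with
  | some c =>
    if c ≠ "" then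
      if PySem.Chars.isIn (PySem.List.pyRepeat c.toList num) string.toList then some c else none
    else pvALoop string.toList num (PySem.List.pyRange 0 ((string.toList.length : Int) - num + 1) 1)
  | none => pvALoop string.toList num (PySem.List.pyRange 0 ((string.toList.length : Int) - num + 1) 1)

-- ===== PORT B =====
-- single pass: run = length of the current streak of equal chars, prev = previous char
def pvBLoop (num : Int) : List Char → Int → Option Char → Option String
  | [], _, _ => none
  | c :: rest, run, prev =>
    let run' := if prev = some c then run + 1 else 1
    if run' = num then some (String.ofList [c]) else pvBLoop num rest run' (some c)

def find_repetition_alt (string : String) (num : Int) (ch : Option String) : Option String :=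
  match ch with
  | some c =>
    if c ≠ "" then
      if PySem.Chars.isIn (PySem.List.pyRepeat c.toList num) string.toList then some c else none
    else pvBLoop num string.toList 0 none
  | none => pvBLoop num string.toList 0 none

-- ===== PRECONDITION & SPEC =====
-- For num < 0 (and ch falsy) A's slice stop i+num goes negative and Python's negative-index
-- wraparound makes A return a character whenever some window of length len+num starting
-- before -num is constant; B returns None there, the intended value for a nonsensical
-- repetition count.
def D_find_repetition (string : String) (num : Int) (ch : Option String) : Prop :=
  ch.getD "" = "" ∧ num < 0 ∧ 0 < (string.toList.length : Int) + num ∧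
  ∃ c ∈ string.toList,
    List.replicate ((string.toList.length : Int) + num).toNat c <:+: string.toList.dropLast
instance (string : String) (num : Int) (ch : Option String) : Decidable (D_find_repetition string num ch) := by unfold D_find_repetition; infer_instance

def Spec_find_repetition (string : String) (num : Int) (ch : Option String) (out : Option String) : Prop := ¬ D_find_repetition string num ch → out = find_repetition_alt string num ch
instance (string : String) (num : Int) (ch : Option String) (out : Option String) : Decidable (Spec_find_repetition string num ch out) := by unfold Spec_find_repetition; infer_instance

def pvDiffWitness_find_repetition : String × Int × Option String := ("ab", -1, none)
def pvDiffWitnessOut_find_repetition : (Option String) × (Option String) := (some "a", none)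

-- ===== CLAIM (what is proved, stated in full; the proofs are below) =====
def Claim_unchanged_find_repetition : Prop := ∀ (string : String) (num : Int) (ch : Option String), Dom_find_repetition string num ch → Spec_find_repetition string num ch (find_repetition string num ch)
def Claim_changed_find_repetition : Prop := Dom_find_repetition (pvDiffWitness_find_repetition.1) (pvDiffWitness_find_repetition.2.1) (pvDiffWitness_find_repetition.2.2) ∧ D_find_repetition (pvDiffWitness_find_repetition.1) (pvDiffWitness_find_repetition.2.1) (pvDiffWitness_find_repetition.2.2) ∧ find_repetition (pvDiffWitness_find_repetition.1) (pvDiffWitness_find_repetition.2.1) (pvDiffWitness_find_repetition.2.2) = pvDiffWitnessOut_find_repetition.1 ∧ find_repetition_alt (pvDiffWitness_find_repetition.1) (pvDiffWitness_find_repetition.2.1) (pvDiffWitness_find_repetition.2.2) = pvDiffWitnessOut_find_repetition.2 ∧ pvDiffWitnessOut_find_repetition.1 ≠ pvDiffWitnessOut_find_repetition.2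
def Claim_exact_find_repetition : Prop := ∀ (string : String) (num : Int) (ch : Option String), Dom_find_repetition string num ch → D_find_repetition string num ch → find_repetition string num ch ≠ find_repetition_alt string num ch

-- ===== LEMMAS AND PROOFS =====

-- set(substr) has one element iff substr is nonempty and constant
theorem pvSetcard_one_iff (w : List Char) :
    (PySem.Set.ofList w).length = 1 ↔ ∃ c, w ≠ [] ∧ ∀ x ∈ w, x = c := by
  rw [← PySem.List.dedup_eq_ofList, List.length_eq_one_iff]
  constructor
  · rintro ⟨c, hc⟩
    refine ⟨c, ?_, fun x hx => ?_⟩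
    · rintro rfl; simp [PySem.List.dedup] at hc
    · have := (PySem.List.mem_dedup w x).2 hx
      rw [hc] at this; simpa using this
  · rintro ⟨c, hne, hall⟩
    refine ⟨c, ?_⟩
    have hnd := PySem.List.nodup_dedup w
    have hmem : ∀ x, x ∈ PySem.List.dedup w ↔ x ∈ w := PySem.List.mem_dedup w
    have hcd : c ∈ PySem.List.dedup w := by
      rw [hmem]
      obtain ⟨y, hy⟩ := List.exists_mem_of_ne_nil w hne
      have := hall y hy; subst this; exact hy
    rcases hd : PySem.List.dedup w with _ | ⟨d, ds⟩
    · rw [hd] at hcd; simp at hcd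
    · rw [hd] at hcd hnd hmem
      have hdc : d = c := hall d ((hmem d).1 (by simp))
      subst hdc
      rcases hds : ds with _ | ⟨e, es⟩
      · rfl
      · exfalso
        rw [hds] at hmem hnd
        have he : e = d := hall e ((hmem e).1 (by simp))
        simp [he] at hnd

-- B never returns for num ≤ 0
theorem pvBLoop_none_of_nonpos (num : Int) (hnum : num ≤ 0) :
    ∀ (l : List Char) (run : Int) (prev : Option Char), 0 ≤ run →
      pvBLoop num l run prev = none := by
  intro l
  induction l with
  | nil => intro run prev _; rfl
  | cons c rest ih =>
    intro run prev hrun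
    simp only [pvBLoop]
    rw [if_neg (by split <;> omega)]
    exact ih _ _ (by split <;> omega)

-- reference: first suffix whose first n chars exist and are all its head
def pvRef (n : Nat) : List Char → Option String
  | [] => none
  | c :: l => if (c :: l).take n = List.replicate n c then some (String.ofList [c]) else pvRef n l

theorem pvRef_none_of_short (n : Nat) : ∀ (l : List Char), l.length < n → pvRef n l = none := by
  intro l
  induction l with
  | nil => intro _; rfl
  | cons c t ih =>
    intro h
    simp only [pvRef]
    rw [if_neg, ih (by simp at h ⊢; omega)]
    intro hc
    have := congrArg List.length hc
    simp at this h
    omega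

-- B = ref, with a credit of r previous chars equal to p
theorem pvBLoop_eq_ref (num : Int) (hnum : 1 ≤ num) :
    ∀ (l : List Char) (r : Int) (p : Char), 0 ≤ r → r < num →
      pvBLoop num l r (some p) = pvRef num.toNat (List.replicate r.toNat p ++ l) := by
  intro l
  induction l with
  | nil =>
    intro r p hr hrn
    have : (List.replicate r.toNat p ++ ([] : List Char)).length < num.toNat := by
      simp; omega
    rw [pvRef_none_of_short _ _ this]; rfl
  | cons c t ih =>
    intro r p hr hrn
    simp only [pvBLoop]
    by_cases hpc : some p = some c
    · rw [if_pos hpc]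
      have hpc' : p = c := Option.some.inj hpc
      subst hpc'
      have hlist : List.replicate r.toNat p ++ p :: t
          = List.replicate (r + 1).toNat p ++ t := by
        have h1 : (r+1).toNat = r.toNat + 1 := by omega
        rw [h1, List.replicate_succ']
        simp
      by_cases hn : r + 1 = num
      · rw [if_pos hn, hlist]
        have h2 : (r+1).toNat = num.toNat := by omega
        rw [h2]
        rcases hrep : List.replicate num.toNat p ++ t with _ | ⟨d, ds⟩
        · exfalso
          have := congrArg List.length hrep
          simp at this; omega
        · have hd : d = p := by
            have h3 : num.toNat = (num.toNat - 1) + 1 := by omega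
            rw [h3, List.replicate_succ] at hrep
            simp at hrep; tauto
          subst hd
          simp only [pvRef]
          rw [if_pos]
          rw [← hrep, List.take_append_of_le_length (by simp)]
          simp
      · rw [if_neg hn, ih (r+1) p (by omega) (by omega), hlist]
    · rw [if_neg hpc]
      have hpc' : p ≠ c := fun h => hpc (by rw [h])
      by_cases hn : (1 : Int) = num
      · rw [if_pos hn]
        have hr0 : r.toNat = 0 := by omega
        rw [hr0]
        simp only [List.replicate_zero, List.nil_append, pvRef]
        rw [if_pos (by
          have h1 : num.toNat = 1 := by omega
          rw [h1]; simp)]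
      · rw [if_neg hn, ih 1 c (by omega) (by omega)]
        have h1 : (1:Int).toNat = 1 := rfl
        rw [h1]
        have key : ∀ (s : Nat), (s : Int) < num →
            pvRef num.toNat (List.replicate s p ++ c :: t)
              = pvRef num.toNat (List.replicate 1 c ++ t) := by
          intro s
          induction s with
          | zero => intro _; simp
          | succ m ihm =>
            intro hs
            rw [List.replicate_succ, List.cons_append]
            simp only [pvRef]
            rw [if_neg, ihm (by push_cast at hs ⊢; omega)]
            intro hcontra
            have hmlt : m + 1 < num.toNat := by omega
            have hL : (p :: (List.replicate m p ++ c :: t))[m+1]? = some c := by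
              simp
            have htake : ((p :: (List.replicate m p ++ c :: t)).take num.toNat)[m+1]?
                = some c := by
              rw [List.getElem?_take_of_lt hmlt]; exact hL
            rw [hcontra] at htake
            rw [List.getElem?_replicate] at htake
            simp [hmlt] at htake
            exact hpc' htake
        exact (key r.toNat (by omega)).symm

theorem pvBLoop_start_eq_ref (num : Int) (hnum : 1 ≤ num) (l : List Char) :
    pvBLoop num l 0 none = pvRef num.toNat l := by
  cases l with
  | nil => rfl
  | cons c t =>
    simp only [pvBLoop]
    rw [show (if (none : Option Char) = some c then (0:Int) + 1 else 1) = 1 from by simp]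
    by_cases hn : (1 : Int) = num
    · rw [if_pos hn]
      simp only [pvRef]
      rw [if_pos (by
        have h1 : num.toNat = 1 := by omega
        rw [h1]; simp)]
    · rw [if_neg hn, pvBLoop_eq_ref num hnum t 1 c (by omega) (by omega)]
      rfl

-- slice characterizations (exact unfolding of PySem.List.slice)
theorem pvSlice_clamp (xs : List Char) (a b : Int) :
    PySem.List.slice xs (some a) (some b)
      = List.take (PySem.List.clampIdx xs.length b - PySem.List.clampIdx xs.length a)
          (List.drop (PySem.List.clampIdx xs.length a) xs) := rfl

theorem pvSlice_neg (l : List Char) (i : Nat) (num : Int) (hiL : i < l.length)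
    (hin : (i : Int) + num < 0) (hLn : 0 < (l.length : Int) + num) :
    PySem.List.slice l (some (i : Int)) (some ((i : Int) + num))
      = (l.drop i).take ((l.length : Int) + num).toNat := by
  rw [pvSlice_clamp]
  have h1 : PySem.List.clampIdx l.length ((i : Int) + num) = ((l.length : Int) + (i : Int) + num).toNat := by
    simp only [PySem.List.clampIdx]
    rw [if_pos hin, if_neg (by omega)]
    congr 1; omega
  have h2 : PySem.List.clampIdx l.length (i : Int) = i := by
    simp only [PySem.List.clampIdx]
    rw [if_neg (by omega)]
    simp; omega
  rw [h1, h2]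
  congr 1
  omega

theorem pvSlice_empty_of_nonpos (l : List Char) (i num : Int) (hi : 0 ≤ i) (hnum : num ≤ 0)
    (hin : 0 ≤ i + num) :
    PySem.List.slice l (some i) (some (i + num)) = [] := by
  rw [PySem.List.slice_toNat l hi hin]
  have h0 : (i + num).toNat - i.toNat = 0 := by omega
  rw [h0]
  simp

theorem pvSlice_pos (l : List Char) (i : Nat) (num : Int) (hnum : 0 ≤ num) :
    PySem.List.slice l (some (i : Int)) (some ((i : Int) + num))
      = (l.drop i).take num.toNat := by
  rw [PySem.List.slice_toNat l (by omega : (0:Int) ≤ (i:Int)) (by omega : (0:Int) ≤ (i:Int) + num)]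
  congr 1
  omega

theorem pvSlice_neg_empty (l : List Char) (i num : Int) (hi : 0 ≤ i) (hin : i + num < 0)
    (h : (l.length : Int) + num ≤ 0 ∨ (l.length : Int) ≤ i) :
    PySem.List.slice l (some i) (some (i + num)) = [] := by
  rw [pvSlice_clamp]
  have hA : PySem.List.clampIdx l.length i = min i.toNat l.length := by
    simp only [PySem.List.clampIdx]
    rw [if_neg (by omega)]
  have hB : PySem.List.clampIdx l.length (i + num) ≤ ((l.length : Int) + i + num).toNat := by
    simp only [PySem.List.clampIdx]
    rw [if_pos hin]
    split <;> omega
  have : PySem.List.clampIdx l.length (i + num) - PySem.List.clampIdx l.length i = 0 := by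
    rw [hA]; omega
  rw [this]; simp

-- shifting A's loop one position left
theorem pvALoop_shift (num : Int) (hnum : 0 ≤ num) (c : Char) (t : List Char) :
    ∀ (js : List Int), (∀ i ∈ js, 0 ≤ i) →
      pvALoop (c :: t) num (js.map (· + 1)) = pvALoop t num js := by
  intro js
  induction js with
  | nil => intro _; rfl
  | cons j rest ih =>
    intro hpos
    have hj : 0 ≤ j := hpos j (by simp)
    simp only [List.map_cons, pvALoop]
    have hsl : PySem.List.slice (c :: t) (some (j + 1)) (some (j + 1 + num))
        = PySem.List.slice t (some j) (some (j + num)) := by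
      obtain ⟨k, hk⟩ : ∃ k : Nat, (k : Int) = j := ⟨j.toNat, by omega⟩
      rw [← hk]
      rw [show ((k : Int) + 1) = ((k + 1 : Nat) : Int) from by push_cast; ring]
      rw [pvSlice_pos (c :: t) (k + 1) num hnum]
      rw [pvSlice_pos t k num hnum]
      simp
    rw [hsl]
    split
    · rfl
    · exact ih (fun i hi => hpos i (by simp [hi]))

theorem pvRange_shift (m : Int) :
    PySem.List.pyRange 1 (m + 1) 1 = (PySem.List.pyRange 0 m 1).map (· + 1) := by
  rw [PySem.List.pyRange_one, PySem.List.pyRange_one]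
  rw [show m + 1 - 1 = m - 0 from by ring]
  rw [List.map_map]
  apply List.map_congr_left
  intro k _
  simp; ring

-- A = ref for num ≥ 1
theorem pvALoop_eq_ref (num : Int) (hnum : 1 ≤ num) :
    ∀ (l : List Char),
      pvALoop l num (PySem.List.pyRange 0 ((l.length : Int) - num + 1) 1) = pvRef num.toNat l := by
  intro l
  induction l with
  | nil =>
    rw [PySem.List.pyRange_one_eq_nil (by simp; omega)]
    rfl
  | cons c t ih =>
    by_cases hlen : num ≤ (t.length : Int) + 1
    · rw [PySem.List.pyRange_one_cons (by simp; omega)]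
      simp only [pvALoop]
      have hsl : PySem.List.slice (c :: t) (some 0) (some (0 + num))
          = (c :: t).take num.toNat := by
        have := pvSlice_pos (c :: t) 0 num (by omega)
        simpa using this
      rw [hsl]
      have hcond : (PySem.Set.ofList ((c :: t).take num.toNat)).length = 1
          ↔ (c :: t).take num.toNat = List.replicate num.toNat c := by
        rw [pvSetcard_one_iff, List.eq_replicate_iff]
        constructor
        · rintro ⟨c', hne, hall⟩
          have hc : c ∈ (c :: t).take num.toNat := by
            have h1 : num.toNat = (num.toNat - 1) + 1 := by omega
            rw [h1, List.take_succ_cons]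
            simp
          have hcc : c = c' := hall c hc
          subst hcc
          refine ⟨?_, hall⟩
          simp; omega
        · rintro ⟨hlen', hall⟩
          refine ⟨c, ?_, hall⟩
          intro hnil
          rw [hnil] at hlen'
          simp at hlen'
          omega
      by_cases hc : (c :: t).take num.toNat = List.replicate num.toNat c
      · rw [if_pos (hcond.2 hc)]
        have hget : PySem.List.pyGet? ((c :: t).take num.toNat) 0 = some c := by
          have : (c :: t).take num.toNat = c :: t.take (num.toNat - 1) := by
            have h1 : num.toNat = (num.toNat - 1) + 1 := by omega
            rw [h1, List.take_succ_cons]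
            congr 1
          rw [this]
          simp [PySem.List.pyGet?, PySem.List.pyIdx?]
        rw [hget]
        simp only [pvRef]
        rw [if_pos hc]
        rfl
      · rw [if_neg (fun h => hc (hcond.1 h))]
        simp only [pvRef]
        rw [if_neg hc]
        rw [show ((c :: t).length : Int) - num + 1 = ((t.length : Int) - num + 1) + 1 from by simp; ring]
        rw [show (0:Int) + 1 = 1 from by norm_num]
        rw [pvRange_shift, pvALoop_shift num (by omega) c t _ (fun i hi => by
          rw [PySem.List.mem_pyRange_one] at hi; omega)]
        exact ih
    · rw [PySem.List.pyRange_one_eq_nil (by simp; omega)]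
      rw [pvRef_none_of_short num.toNat (c :: t) (by simp; omega)]
      rfl

-- window at i is constant-nonempty iff i is a D_-style witness (num < 0)
theorem pvCheck_iff_witness (l : List Char) (num : Int) (hnum : num < 0) (i : Int) (hi : 0 ≤ i) :
    (PySem.Set.ofList (PySem.List.slice l (some i) (some (i + num)))).length = 1
      ↔ (0 < (l.length : Int) + num ∧ i.toNat < l.length ∧ i < -num ∧
          (l.drop i.toNat).take ((l.length : Int) + num).toNat
            = List.replicate ((l.length : Int) + num).toNat (l.getD i.toNat 'a')) := by
  constructor
  · intro hcard
    rw [pvSetcard_one_iff] at hcard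
    obtain ⟨c, hne, hall⟩ := hcard
    by_cases hin : 0 ≤ i + num
    · exact absurd (pvSlice_empty_of_nonpos l i num hi (by omega) hin) hne
    push Not at hin
    have hLn : 0 < (l.length : Int) + num := by
      by_contra h
      exact hne (pvSlice_neg_empty l i num hi hin (Or.inl (by omega)))
    have hiL : i.toNat < l.length := by
      by_contra h
      exact hne (pvSlice_neg_empty l i num hi hin (Or.inr (by omega)))
    have hi' : ((i.toNat : Nat) : Int) = i := by omega
    have hsl := pvSlice_neg l i.toNat num hiL (by omega) hLn
    rw [hi'] at hsl
    refine ⟨hLn, hiL, by omega, ?_⟩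
    rw [List.eq_replicate_iff]
    set k := ((l.length : Int) + num).toNat with hk
    have hklen : ((l.drop i.toNat).take k).length = k := by
      simp
      omega
    have hhead : l.getD i.toNat 'a' ∈ (l.drop i.toNat).take k := by
      have h0 : ((l.drop i.toNat).take k)[0]? = some l[i.toNat] := by
        rw [List.getElem?_take_of_lt (by omega), List.getElem?_drop]
        simp [hiL]
      have : l.getD i.toNat 'a' = l[i.toNat] := List.getD_eq_getElem l 'a' hiL
      rw [this]
      exact List.mem_of_getElem? h0
    rw [hsl] at hall
    refine ⟨hklen, fun b hb => ?_⟩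
    rw [hall b hb, hall _ hhead]
  · rintro ⟨hLn, hiL, hin, hrep⟩
    have hi' : ((i.toNat : Nat) : Int) = i := by omega
    have hsl := pvSlice_neg l i.toNat num hiL (by omega) hLn
    rw [hi'] at hsl
    rw [pvSetcard_one_iff, hsl, hrep]
    refine ⟨l.getD i.toNat 'a', ?_, by simp⟩
    intro hnil
    have := congrArg List.length hnil
    simp at this
    omega


-- the compact D_ run condition equals the indexed replicate form used by the lemmas above
theorem pvD_core_iff (l : List Char) (num : Int) (hnum : num < 0)
    (hLn : 0 < (l.length : Int) + num) :
    (∃ c ∈ l, List.replicate ((l.length : Int) + num).toNat c <:+: l.dropLast)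
      ↔ (∃ i < l.length, (i : Int) < -num ∧
          (l.drop i).take ((l.length : Int) + num).toNat
            = List.replicate ((l.length : Int) + num).toNat (l.getD i 'a')) := by
  set k := ((l.length : Int) + num).toNat with hk
  have hkpos : 0 < k := by omega
  have hkle : k ≤ l.length - 1 := by omega
  have hdl : l.dropLast = l.take (l.length - 1) := List.dropLast_eq_take
  constructor
  · rintro ⟨c, hcmem, s, t, hst⟩
    set i := s.length with hi
    have hlen : s.length + (k + t.length) = l.length - 1 := by
      have := congrArg List.length hst
      simp [hdl] at this
      omega
    have hiL : i < l.length := by omega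
    have hin : (i : Int) < -num := by omega
    have hl' : l = l.dropLast ++ l.drop (l.length - 1) := by
      rw [hdl, List.take_append_drop]
    have hdrop : l.drop i = List.replicate k c ++ (t ++ l.drop (l.length - 1)) := by
      conv_lhs => rw [hl']
      rw [List.drop_append_of_le_length (by rw [hdl]; simp; omega)]
      rw [← hst, List.append_assoc, List.drop_left]
      simp
    have hgd : l.getD i 'a' = c := by
      have h0 : l[i]? = some c := by
        have : (l.drop i)[0]? = some c := by
          rw [hdrop]
          rcases hc : List.replicate k c with _ | ⟨d, ds⟩
          · exfalso; have := congrArg List.length hc; simp at this; omega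
          · have hd : d = c := by
              have := List.mem_replicate.1 (hc ▸ (List.mem_cons_self : d ∈ d :: ds))
              exact this.2
            simp [hd]
        rw [List.getElem?_drop] at this
        simpa using this
      rw [List.getD_eq_getElem?_getD, h0]
      rfl
    refine ⟨i, hiL, hin, ?_⟩
    rw [hdrop, hgd, List.take_append_of_le_length (by simp), List.take_replicate]
    simp
  · rintro ⟨i, hiL, hin, hrep⟩
    have hik : i + k ≤ l.length - 1 := by omega
    refine ⟨l.getD i 'a', ?_, ?_⟩
    · rw [List.getD_eq_getElem l 'a' hiL]
      exact List.getElem_mem hiL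
    · refine ⟨l.take i, ((l.drop i).drop k).take (l.length - 1 - i - k), ?_⟩
      rw [hdl]
      rw [show l.length - 1 = i + (k + (l.length - 1 - i - k)) from by omega]
      rw [List.take_add, List.take_add]
      rw [← hrep]
      simp

-- A-side: for num ≤ 0 outside the change region every window check fails
theorem pvALoop_none_nonpos (l : List Char) (num : Int) (hnum : num ≤ 0)
    (hD : ¬ (0 < (l.length : Int) + num ∧
      ∃ i < l.length, (i : Int) < -num ∧
        (l.drop i).take ((l.length : Int) + num).toNat
          = List.replicate ((l.length : Int) + num).toNat (l.getD i 'a'))) :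
    ∀ (js : List Int), (∀ i ∈ js, 0 ≤ i) → pvALoop l num js = none := by
  intro js
  induction js with
  | nil => intro _; rfl
  | cons j rest ih =>
    intro hpos
    have hj : 0 ≤ j := hpos j (by simp)
    simp only [pvALoop]
    rw [if_neg, ih (fun i hi => hpos i (by simp [hi]))]
    intro hcard
    by_cases h0 : num = 0
    · subst h0
      rw [pvSlice_empty_of_nonpos l j 0 hj le_rfl (by omega)] at hcard
      simp [PySem.Set.ofList, PySem.Set.empty] at hcard
    · have hneg : num < 0 := by omega
      rw [pvCheck_iff_witness l num hneg j hj] at hcard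
      exact hD ⟨hcard.1, j.toNat, hcard.2.1, by omega, hcard.2.2.2⟩

-- A-side: a passing window somewhere in the index list forces a Some result
theorem pvALoop_ne_none (l : List Char) (num : Int) :
    ∀ (js : List Int), ∀ i ∈ js,
      (PySem.Set.ofList (PySem.List.slice l (some i) (some (i + num)))).length = 1 →
      pvALoop l num js ≠ none := by
  intro js
  induction js with
  | nil => intro i hi; simp at hi
  | cons j rest ih =>
    intro i hi hcard
    simp only [pvALoop]
    by_cases hj : (PySem.Set.ofList (PySem.List.slice l (some j) (some (j + num)))).length = 1
    · rw [if_pos hj]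
      have hne : PySem.List.slice l (some j) (some (j + num)) ≠ [] := by
        rw [pvSetcard_one_iff] at hj
        exact hj.choose_spec.1
      rcases hd : PySem.List.slice l (some j) (some (j + num)) with _ | ⟨d, ds⟩
      · exact absurd hd hne
      · simp [PySem.List.pyGet?, PySem.List.pyIdx?]
    · rw [if_neg hj]
      rcases List.mem_cons.1 hi with rfl | hrest
      · exact absurd hcard hj
      · exact ih i hrest hcard

-- the scan equality outside D_
theorem pvScan_eq (l : List Char) (num : Int)
    (hD : ¬ (num < 0 ∧ 0 < (l.length : Int) + num ∧
      ∃ i < l.length, (i : Int) < -num ∧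
        (l.drop i).take ((l.length : Int) + num).toNat
          = List.replicate ((l.length : Int) + num).toNat (l.getD i 'a'))) :
    pvALoop l num (PySem.List.pyRange 0 ((l.length : Int) - num + 1) 1)
      = pvBLoop num l 0 none := by
  by_cases hnum : 1 ≤ num
  · rw [pvALoop_eq_ref num hnum l, pvBLoop_start_eq_ref num hnum l]
  · have h0 : num ≤ 0 := by omega
    rw [pvBLoop_none_of_nonpos num h0 l 0 none le_rfl]
    apply pvALoop_none_nonpos l num h0
    · intro hcore
      by_cases hz : num = 0
      · subst hz
        obtain ⟨-, i, -, hii, -⟩ := hcore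
        omega
      · exact hD ⟨by omega, hcore⟩
    · intro i hi
      rw [PySem.List.mem_pyRange_one] at hi
      omega

-- ===== VERDICT (by name: the statement is the Claim_ definition above) =====
theorem find_repetition_spec : Claim_unchanged_find_repetition := by
  intro string num ch _
  unfold Spec_find_repetition
  intro hnD
  unfold D_find_repetition at hnD
  have hcore : ∀ hch : ch.getD "" = "",
      ¬ (num < 0 ∧ 0 < (string.toList.length : Int) + num ∧
        ∃ i < string.toList.length, (i : Int) < -num ∧
          (string.toList.drop i).take ((string.toList.length : Int) + num).toNat
            = List.replicate ((string.toList.length : Int) + num).toNat (string.toList.getD i 'a')) := by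
    intro hch hcore
    exact hnD ⟨hch, hcore.1, hcore.2.1,
      (pvD_core_iff string.toList num hcore.1 hcore.2.1).2 hcore.2.2⟩
  rcases ch with _ | c
  · show pvALoop _ _ _ = pvBLoop _ _ _ _
    exact pvScan_eq string.toList num (hcore rfl)
  · by_cases hc : c = ""
    · subst hc
      show find_repetition string num (some "") = find_repetition_alt string num (some "")
      unfold find_repetition find_repetition_alt
      simp only [ne_eq, not_true_eq_false, if_false]
      exact pvScan_eq string.toList num (hcore rfl)
    · unfold find_repetition find_repetition_alt
      simp only [ne_eq, hc, not_false_eq_true, if_true]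

theorem find_repetition_changed : Claim_changed_find_repetition := by
  unfold Claim_changed_find_repetition
  refine ⟨by decide, ⟨rfl, by decide, by decide, 'a', by decide, [], [], by decide⟩,
    by decide, by decide, by decide⟩

theorem find_repetition_tight : Claim_exact_find_repetition := by
  intro string num ch _ hD
  obtain ⟨hch, hnum, hLn, hwin⟩ := hD
  obtain ⟨i, hiL, hin, hrep⟩ := (pvD_core_iff string.toList num hnum hLn).1 hwin
  have hB : find_repetition_alt string num ch = none := by
    rcases ch with _ | c
    · exact pvBLoop_none_of_nonpos num (by omega) string.toList 0 none le_rfl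
    · have hc : c = "" := hch
      subst hc
      have h : find_repetition_alt string num (some "") = pvBLoop num string.toList 0 none := by
        unfold find_repetition_alt
        simp
      rw [h]
      exact pvBLoop_none_of_nonpos num (by omega) string.toList 0 none le_rfl
  rw [hB]
  have hA : find_repetition string num ch
      = pvALoop string.toList num (PySem.List.pyRange 0 ((string.toList.length : Int) - num + 1) 1) := by
    rcases ch with _ | c
    · rfl
    · have hc : c = "" := hch
      subst hc
      unfold find_repetition
      simp
  rw [hA]
  apply pvALoop_ne_none string.toList num _ (i : Int)
  · rw [PySem.List.mem_pyRange_one]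
    constructor
    · omega
    · omega
  · rw [pvCheck_iff_witness string.toList num hnum (i : Int) (by omega)]
    refine ⟨hLn, by simpa using hiL, by omega, by simpa using hrep⟩
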